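-- pv_equiv track=rewrite | github.com/ognile/commentfront | backend/reddit_program_notifications.py | build_program_counts
-- ===== SOURCE A (Python) =====
-- from typing import Any, Dict, List, Optional
--
-- def build_program_counts(program: Dict[str, Any]) -> Dict[str, Any]:
--     work_items = list(((program.get("compiled") or {}).get("work_items") or []))
--     counts: Dict[str, Dict[str, int]] = {}
--     for item in work_items:
--         action = str(item.get("action") or "unknown")
--         bucket = counts.setdefault(action, {"planned": 0, "completed": 0, "pending": 0, "blocked": 0})
--         bucket["planned"] += 1
--         status = str(item.get("status") or "pending")
--         if status == "completed":
--             bucket["completed"] += 1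
--         elif status in {"blocked", "exhausted", "cancelled"}:
--             bucket["blocked"] += 1
--         else:
--             bucket["pending"] += 1
--     return counts
-- ===== SOURCE B (Python) =====
-- from typing import Any, Dict
--
-- def build_program_counts(program: Dict[str, Any]) -> Dict[str, Any]:
--     work_items = list(((program.get("compiled") or {}).get("work_items") or []))
--     groups: Dict[str, list] = {}
--     for item in work_items:
--         groups.setdefault(str(item.get("action") or "unknown"), []).append(
--             str(item.get("status") or "pending"))
--     counts: Dict[str, Dict[str, int]] = {}
--     for action, statuses in groups.items():
--         planned = len(statuses)
--         completed = statuses.count("completed")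
--         blocked = sum(1 for s in statuses if s in {"blocked", "exhausted", "cancelled"})
--         counts[action] = {"planned": planned, "completed": completed,
--                          "pending": planned - completed - blocked, "blocked": blocked}
--     return counts
-- ===== Notes on version B (the rewrite author's own statement) =====
-- stated objective: alternative
-- what changed: Replaces A's per-item incremental setdefault-and-increment loop over a dict of counter dicts with a two-phase group-then-aggregate: first group status strings by action in encounter order, then build each bucket from len/count, deriving pending by subtraction.
import Mathlib
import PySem

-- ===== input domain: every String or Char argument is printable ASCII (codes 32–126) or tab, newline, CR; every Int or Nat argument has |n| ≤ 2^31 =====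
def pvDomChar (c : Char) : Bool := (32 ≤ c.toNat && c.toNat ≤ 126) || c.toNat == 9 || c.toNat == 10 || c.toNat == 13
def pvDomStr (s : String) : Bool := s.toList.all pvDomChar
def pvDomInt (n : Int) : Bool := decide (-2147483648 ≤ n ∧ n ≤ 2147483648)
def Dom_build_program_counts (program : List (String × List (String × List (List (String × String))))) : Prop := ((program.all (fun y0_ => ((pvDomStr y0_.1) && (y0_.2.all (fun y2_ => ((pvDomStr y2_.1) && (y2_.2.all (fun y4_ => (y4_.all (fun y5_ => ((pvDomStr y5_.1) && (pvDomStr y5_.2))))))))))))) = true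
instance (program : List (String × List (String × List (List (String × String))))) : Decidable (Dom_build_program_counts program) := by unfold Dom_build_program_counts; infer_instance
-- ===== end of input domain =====

-- B replaces A's per-item setdefault-and-increment loop with a two-phase group-then-aggregate
-- (statuses grouped by action, buckets built from len/count with pending derived by subtraction);
-- objective: alternative decomposition, same cost.

-- str(x or default) for an optional string (Python '' is falsy)
def pvOrStr (o : Option String) (d : String) : String :=
  match o with
  | some s => if s = "" then d else s
  | none => d

-- ===== PORT A =====
def build_program_counts (program : List (String × List (String × List (List (String × String))))) : List (String × List (String × Int)) :=
  let compiled := ((PySem.Dict.mk program).get? "compiled").getD []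
  let work_items := ((PySem.Dict.mk compiled).get? "work_items").getD []
  let counts : PySem.Dict String (PySem.Dict String Int) :=
    work_items.foldl (fun counts item =>
      let action := pvOrStr ((PySem.Dict.mk item).get? "action") "unknown"
      let counts := counts.setdefault action (PySem.Dict.mk [("planned", 0), ("completed", 0), ("pending", 0), ("blocked", 0)])
      let counts := counts.modify action PySem.Dict.empty (fun b => b.modify "planned" 0 (· + 1))
      let status := pvOrStr ((PySem.Dict.mk item).get? "status") "pending"
      if status = "completed" then
        counts.modify action PySem.Dict.empty (fun b => b.modify "completed" 0 (· + 1))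
      else if status = "blocked" ∨ status = "exhausted" ∨ status = "cancelled" then
        counts.modify action PySem.Dict.empty (fun b => b.modify "blocked" 0 (· + 1))
      else
        counts.modify action PySem.Dict.empty (fun b => b.modify "pending" 0 (· + 1))) PySem.Dict.empty
  counts.items.map (fun p => (p.1, p.2.items))

-- ===== PORT B =====
def build_program_counts_alt (program : List (String × List (String × List (List (String × String))))) : List (String × List (String × Int)) :=
  let compiled := ((PySem.Dict.mk program).get? "compiled").getD []
  let work_items := ((PySem.Dict.mk compiled).get? "work_items").getD []
  let groups : PySem.Dict String (List String) :=
    work_items.foldl (fun g item =>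
      g.modify (pvOrStr ((PySem.Dict.mk item).get? "action") "unknown") []
        (· ++ [pvOrStr ((PySem.Dict.mk item).get? "status") "pending"])) PySem.Dict.empty
  let counts : PySem.Dict String (PySem.Dict String Int) :=
    groups.items.foldl (fun c p =>
      let planned : Int := p.2.length
      let completed : Int := p.2.count "completed"
      let blocked : Int := p.2.countP (fun s => s == "blocked" || s == "exhausted" || s == "cancelled")
      c.insert p.1 (PySem.Dict.ofList [("planned", planned), ("completed", completed), ("pending", planned - completed - blocked), ("blocked", blocked)])) PySem.Dict.empty
  counts.items.map (fun p => (p.1, p.2.items))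

-- ===== PRECONDITION & SPEC =====
-- Pre_ excludes only association lists with duplicate keys at the three dict levels A reads (the program
-- itself, its "compiled" dict, and each work item): such lists encode no Python dict (Python dict keys are
-- unique), so no actual Python input is excluded; on them first-match lookup order is an encoding artefact.
def Pre_build_program_counts (program : List (String × List (String × List (List (String × String))))) : Prop :=
  (program.map Prod.fst).Nodup ∧
  ∀ c ∈ program, c.1 = "compiled" →
    ((c.2.map Prod.fst).Nodup ∧ ∀ w ∈ c.2, w.1 = "work_items" →
      ∀ item ∈ w.2, (item.map Prod.fst).Nodup)
instance (program : List (String × List (String × List (List (String × String))))) : Decidable (Pre_build_program_counts program) := by unfold Pre_build_program_counts; infer_instance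
def pvWitness_build_program_counts : (List (String × List (String × List (List (String × String))))) := ([("compiled", [("work_items", [[("action", "a"), ("status", "completed")]])])])
def Spec_build_program_counts (program : List (String × List (String × List (List (String × String))))) (out : List (String × List (String × Int))) : Prop := out = build_program_counts_alt program
instance (program : List (String × List (String × List (List (String × String))))) (out : List (String × List (String × Int))) : Decidable (Spec_build_program_counts program out) := by unfold Spec_build_program_counts; infer_instance

-- ===== CLAIM (what is proved, stated in full; the proofs are below) =====
def Claim_equal_build_program_counts : Prop := ∀ (program : List (String × List (String × List (List (String × String))))), Dom_build_program_counts program → Pre_build_program_counts program → Spec_build_program_counts program (build_program_counts program)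

-- ===== LEMMAS AND PROOFS =====

-- the action / status of a work item
def pvKey (item : List (String × String)) : String := pvOrStr ((PySem.Dict.mk item).get? "action") "unknown"
def pvVal (item : List (String × String)) : String := pvOrStr ((PySem.Dict.mk item).get? "status") "pending"

def pvBlk (s : String) : Bool := s == "blocked" || s == "exhausted" || s == "cancelled"

-- the bucket B builds for a list of statuses
def pvBucket (ss : List String) : PySem.Dict String Int :=
  PySem.Dict.mk [("planned", (ss.length : Int)), ("completed", (ss.count "completed" : Int)),
    ("pending", (ss.length : Int) - (ss.count "completed" : Int) - (ss.countP pvBlk : Int)),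
    ("blocked", (ss.countP pvBlk : Int))]

def pvDef0 : PySem.Dict String Int := PySem.Dict.mk [("planned", 0), ("completed", 0), ("pending", 0), ("blocked", 0)]

-- A's per-item update of one bucket
def pvUpd (b : PySem.Dict String Int) (s : String) : PySem.Dict String Int :=
  if s = "completed" then (b.modify "planned" 0 (· + 1)).modify "completed" 0 (· + 1)
  else if s = "blocked" ∨ s = "exhausted" ∨ s = "cancelled" then (b.modify "planned" 0 (· + 1)).modify "blocked" 0 (· + 1)
  else (b.modify "planned" 0 (· + 1)).modify "pending" 0 (· + 1)

-- A's loop body and B's grouping loop body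
def pvStepA (c : PySem.Dict String (PySem.Dict String Int)) (item : List (String × String)) : PySem.Dict String (PySem.Dict String Int) :=
  let action := pvOrStr ((PySem.Dict.mk item).get? "action") "unknown"
  let c := c.setdefault action (PySem.Dict.mk [("planned", 0), ("completed", 0), ("pending", 0), ("blocked", 0)])
  let c := c.modify action PySem.Dict.empty (fun b => b.modify "planned" 0 (· + 1))
  let status := pvOrStr ((PySem.Dict.mk item).get? "status") "pending"
  if status = "completed" then
    c.modify action PySem.Dict.empty (fun b => b.modify "completed" 0 (· + 1))
  else if status = "blocked" ∨ status = "exhausted" ∨ status = "cancelled" then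
    c.modify action PySem.Dict.empty (fun b => b.modify "blocked" 0 (· + 1))
  else
    c.modify action PySem.Dict.empty (fun b => b.modify "pending" 0 (· + 1))

def pvStepG (g : PySem.Dict String (List String)) (item : List (String × String)) : PySem.Dict String (List String) :=
  g.modify (pvKey item) [] (· ++ [pvVal item])

-- the image of a grouping dict under bucket-building
def pvDictF (g : PySem.Dict String (List String)) : PySem.Dict String (PySem.Dict String Int) :=
  PySem.Dict.mk (g.items.map (fun p => (p.1, pvBucket p.2)))

theorem pvItems_DictF (g : PySem.Dict String (List String)) :
    (pvDictF g).items = g.items.map (fun p => (p.1, pvBucket p.2)) := rfl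

theorem pvKeys_DictF (g : PySem.Dict String (List String)) : (pvDictF g).keys = g.keys := by
  simp [pvDictF, PySem.Dict.keys, List.map_map, Function.comp]

theorem pvDef0_eq : pvDef0 = pvBucket [] := by decide

theorem pvBucket_step (ss : List String) (s : String) :
    pvUpd (pvBucket ss) s = pvBucket (ss ++ [s]) := by
  unfold pvUpd
  split_ifs with h1 h2
  · subst h1
    apply PySem.Dict.ext
    simp [pvBucket, PySem.Dict.modify, PySem.Dict.insert, PySem.Dict.getD, PySem.Dict.get?, PySem.Dict.contains, pvBlk]
  · have hb : pvBlk s = true := by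
      rcases h2 with h | h | h <;> simp [pvBlk, h]
    have hc : s ≠ "completed" := h1
    apply PySem.Dict.ext
    simp [pvBucket, PySem.Dict.modify, PySem.Dict.insert, PySem.Dict.getD, PySem.Dict.get?, PySem.Dict.contains, hb, hc, List.count_append, List.countP_append]
    ring
  · have hb : pvBlk s = false := by
      simp [pvBlk, show s ≠ "blocked" from fun h => h2 (Or.inl h),
        show s ≠ "exhausted" from fun h => h2 (Or.inr (Or.inl h)),
        show s ≠ "cancelled" from fun h => h2 (Or.inr (Or.inr h))]
    have hc : s ≠ "completed" := h1
    apply PySem.Dict.ext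
    simp [pvBucket, PySem.Dict.modify, PySem.Dict.insert, PySem.Dict.getD, PySem.Dict.get?, PySem.Dict.contains, hb, hc, List.count_append, List.countP_append]
    ring

theorem pvStepA_eq (c : PySem.Dict String (PySem.Dict String Int)) (item : List (String × String)) :
    pvStepA c item =
      (c.setdefault (pvKey item) pvDef0).insert (pvKey item)
        (pvUpd ((c.setdefault (pvKey item) pvDef0).getD (pvKey item) PySem.Dict.empty) (pvVal item)) := by
  unfold pvStepA pvUpd pvKey pvVal pvDef0
  simp only [PySem.Dict.modify]
  split_ifs <;>
    rw [PySem.Dict.getD_insert_self, PySem.Dict.insert_insert_self]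

theorem pvMem_items_of_mem_keys (g : PySem.Dict String (List String)) (a : String)
    (ha : a ∈ g.keys) : ∃ ss, (a, ss) ∈ g.items := by
  simp only [PySem.Dict.keys, List.mem_map] at ha
  obtain ⟨p, hp, hpa⟩ := ha
  exact ⟨p.2, by simpa [← hpa] using hp⟩

theorem pvStep_comm (g : PySem.Dict String (List String)) (item : List (String × String))
    (h : g.keys.Nodup) : pvStepA (pvDictF g) item = pvDictF (pvStepG g item) := by
  have hF : (pvDictF g).keys.Nodup := by rw [pvKeys_DictF]; exact h
  rw [pvStepA_eq]
  unfold pvStepG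
  simp only [PySem.Dict.modify]
  by_cases hc : g.contains (pvKey item) = true
  · have hcF : (pvDictF g).contains (pvKey item) = true := by
      rw [PySem.Dict.contains_iff_mem_keys, pvKeys_DictF]
      exact (PySem.Dict.contains_iff_mem_keys g (pvKey item)).mp hc
    obtain ⟨ss, hmem⟩ := pvMem_items_of_mem_keys g (pvKey item) ((PySem.Dict.contains_iff_mem_keys g (pvKey item)).mp hc)
    have hgD : g.getD (pvKey item) [] = ss := PySem.Dict.getD_of_mem_items g hmem h []
    have hFmem : (pvKey item, pvBucket ss) ∈ (pvDictF g).items := by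
      simp only [pvDictF]
      exact List.mem_map.mpr ⟨(pvKey item, ss), hmem, rfl⟩
    have hFD : (pvDictF g).getD (pvKey item) PySem.Dict.empty = pvBucket ss :=
      PySem.Dict.getD_of_mem_items _ hFmem hF _
    rw [PySem.Dict.setdefault_of_contains _ _ hcF, hFD, pvBucket_step, hgD]
    apply PySem.Dict.ext
    rw [PySem.Dict.items_insert_of_contains _ _ hcF, pvItems_DictF,
        pvItems_DictF, PySem.Dict.items_insert_of_contains _ _ hc]
    simp only [List.map_map]
    apply List.map_congr_left
    intro p _
    by_cases hp : p.1 = pvKey item <;> simp [Function.comp, hp]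
  · have hc' : g.contains (pvKey item) = false := by simpa using hc
    have hcF : (pvDictF g).contains (pvKey item) = false := by
      rw [PySem.Dict.contains_eq_decide_mem_keys, pvKeys_DictF, ← PySem.Dict.contains_eq_decide_mem_keys]
      exact hc'
    rw [PySem.Dict.setdefault_of_not_contains _ _ hcF]
    rw [PySem.Dict.getD_insert_self, PySem.Dict.insert_insert_self, pvDef0_eq, pvBucket_step]
    rw [PySem.Dict.getD_of_not_contains _ _ hc']
    apply PySem.Dict.ext
    rw [PySem.Dict.items_insert_of_not_contains _ _ hcF, pvItems_DictF,
        pvItems_DictF, PySem.Dict.items_insert_of_not_contains _ _ hc']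
    simp

theorem pvFold_comm (l : List (List (String × String))) (g : PySem.Dict String (List String))
    (h : g.keys.Nodup) :
    l.foldl pvStepA (pvDictF g) = pvDictF (l.foldl pvStepG g) := by
  induction l generalizing g with
  | nil => rfl
  | cons item l ih =>
    simp only [List.foldl_cons, pvStep_comm g item h]
    exact ih _ (PySem.Dict.nodup_keys_insert g _ _ h)

-- ===== VERDICT (by name: the statement is the Claim_ definition above) =====
theorem build_program_counts_spec : Claim_equal_build_program_counts := by
  intro program _ _
  unfold Spec_build_program_counts build_program_counts build_program_counts_alt
  set l := ((PySem.Dict.mk (((PySem.Dict.mk program).get? "compiled").getD [])).get? "work_items").getD [] with hl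
  have hgnd : (l.foldl pvStepG PySem.Dict.empty).keys.Nodup :=
    PySem.Dict.nodup_keys_foldl_modify_key l pvKey [] (fun _ it => (· ++ [pvVal it]))
      PySem.Dict.empty (by simp [PySem.Dict.keys, PySem.Dict.empty])
  have hA : l.foldl pvStepA PySem.Dict.empty = pvDictF (l.foldl pvStepG PySem.Dict.empty) :=
    pvFold_comm l PySem.Dict.empty (by simp [PySem.Dict.keys, PySem.Dict.empty])
  have hB : ((l.foldl pvStepG PySem.Dict.empty).items.foldl
      (fun (c : PySem.Dict String (PySem.Dict String Int)) p => c.insert p.1 (pvBucket p.2))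
      PySem.Dict.empty).items = (l.foldl pvStepG PySem.Dict.empty).items.map (fun p => (p.1, pvBucket p.2)) := by
    exact PySem.Dict.items_foldl_insert_fresh ((l.foldl pvStepG PySem.Dict.empty).items)
        (fun p : String × List String => p.1) (fun p : String × List String => pvBucket p.2)
        PySem.Dict.empty (fun a _ => PySem.Dict.contains_empty a.1) hgnd
  show (l.foldl pvStepA PySem.Dict.empty).items.map (fun p => (p.1, p.2.items)) =
    ((l.foldl pvStepG PySem.Dict.empty).items.foldl
      (fun (c : PySem.Dict String (PySem.Dict String Int)) p => c.insert p.1 (pvBucket p.2))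
      PySem.Dict.empty).items.map (fun p => (p.1, p.2.items))
  rw [hA, hB]
  rfl
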